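-- pv_equiv track=rewrite | github.com/koskin17/MyEducation | Обучение/CodeWars/поиск наибольшей разницы между словами в двух списках.py | mxdiflg
-- ===== SOURCE A (Python) =====
-- def mxdiflg(a1, a2):
--     if a1 == [] or a2 == []:
--         return -1
--     else:
--         dif = 0
--         for word1 in a1:
--             for word2 in a2:
--                 if abs(len(word1) - len(word2)) > dif:
--                     dif = abs(len(word1) - len(word2))
--     return dif
-- ===== SOURCE B (Python) =====
-- def mxdiflg(a1, a2):
--     if not a1 or not a2:
--         return -1
--     lens1 = [len(w) for w in a1]
--     lens2 = [len(w) for w in a2]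
--     return max(max(lens1) - min(lens2), max(lens2) - min(lens1))
-- ===== Notes on version B (the rewrite author's own statement) =====
-- stated objective: faster
-- what changed: Replaces the O(n*m) nested pairwise scan with a single pass collecting min/max word lengths of each list and combining the extremes: max(max1-min2, max2-min1).
import Mathlib
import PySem

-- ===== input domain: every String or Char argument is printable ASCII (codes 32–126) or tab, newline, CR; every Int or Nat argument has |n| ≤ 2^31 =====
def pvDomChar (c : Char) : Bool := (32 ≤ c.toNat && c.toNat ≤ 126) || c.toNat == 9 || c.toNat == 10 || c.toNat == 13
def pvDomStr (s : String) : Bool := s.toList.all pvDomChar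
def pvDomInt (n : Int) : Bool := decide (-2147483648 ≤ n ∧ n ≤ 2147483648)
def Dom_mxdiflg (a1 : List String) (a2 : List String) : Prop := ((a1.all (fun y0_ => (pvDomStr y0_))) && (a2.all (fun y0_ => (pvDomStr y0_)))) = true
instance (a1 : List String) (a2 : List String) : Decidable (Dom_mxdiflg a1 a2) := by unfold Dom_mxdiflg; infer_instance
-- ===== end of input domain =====

-- B replaces A's O(n*m) nested pairwise scan by one pass over each list collecting the
-- extreme word lengths and combining them: max(max1-min2, max2-min1) (asymptotically faster).

-- ===== PORT A =====
def mxdiflg (a1 : List String) (a2 : List String) : Int :=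
  if a1 = [] ∨ a2 = [] then -1
  else
    a1.foldl (fun dif w1 =>
      a2.foldl (fun d w2 =>
        if |PySem.Str.len w1 - PySem.Str.len w2| > d
        then |PySem.Str.len w1 - PySem.Str.len w2| else d) dif) 0

-- ===== PORT B =====
def mxdiflg_alt (a1 : List String) (a2 : List String) : Int :=
  if a1 = [] ∨ a2 = [] then -1
  else
    let lens1 := a1.map PySem.Str.len
    let lens2 := a2.map PySem.Str.len
    max ((PySem.List.max? lens1 (fun x => x)).getD 0 - (PySem.List.min? lens2 (fun x => x)).getD 0)
        ((PySem.List.max? lens2 (fun x => x)).getD 0 - (PySem.List.min? lens1 (fun x => x)).getD 0)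

-- ===== PRECONDITION & SPEC =====
def Spec_mxdiflg (a1 : List String) (a2 : List String) (out : Int) : Prop := out = mxdiflg_alt a1 a2
instance (a1 : List String) (a2 : List String) (out : Int) : Decidable (Spec_mxdiflg a1 a2 out) := by unfold Spec_mxdiflg; infer_instance

-- ===== CLAIM (what is proved, stated in full; the proofs are below) =====
def Claim_equal_mxdiflg : Prop := ∀ (a1 : List String) (a2 : List String), Dom_mxdiflg a1 a2 → Spec_mxdiflg a1 a2 (mxdiflg a1 a2)

-- ===== LEMMAS AND PROOFS =====

-- an inflationary foldl never drops below its initial accumulator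
lemma pv_infl_le {α : Type} (step : Int → α → Int) (h : ∀ d x, d ≤ step d x) :
    ∀ (l : List α) (d : Int), d ≤ l.foldl step d := by
  intro l
  induction l with
  | nil => intro d; simp
  | cons x t ih => intro d; exact le_trans (h d x) (ih (step d x))

-- anything one step guarantees for a member is a lower bound on the whole fold
lemma pv_infl_mem {α : Type} (step : Int → α → Int) (h : ∀ d x, d ≤ step d x)
    (t : Int) (x0 : α) (ht : ∀ d, t ≤ step d x0) :
    ∀ (l : List α) (d : Int), x0 ∈ l → t ≤ l.foldl step d := by
  intro l
  induction l with
  | nil => intro d hm; cases hm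
  | cons x tl ih =>
    intro d hm
    rcases List.mem_cons.mp hm with rfl | hm
    · exact le_trans (ht d) (pv_infl_le step h tl (step d x0))
    · exact ih (step d x) hm

-- the fold's result is either the initial value or attained at some element
lemma pv_infl_att {α : Type} (step : Int → α → Int) (P : Int → α → Prop)
    (h : ∀ d x, step d x = d ∨ P (step d x) x) :
    ∀ (l : List α) (d : Int), l.foldl step d = d ∨ ∃ x ∈ l, P (l.foldl step d) x := by
  intro l
  induction l with
  | nil => intro d; exact Or.inl rfl
  | cons x t ih =>
    intro d
    rcases ih (step d x) with heq | ⟨x', hx', hp⟩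
    · simp only [List.foldl_cons]
      rcases h d x with h0 | hp'
      · exact Or.inl (heq.trans h0)
      · exact Or.inr ⟨x, List.mem_cons_self, by rw [heq]; exact hp'⟩
    · exact Or.inr ⟨x', List.mem_cons_of_mem _ hx', hp⟩

lemma pv_if_max (d c : Int) : (if c > d then c else d) = max d c := by
  rcases le_total c d with h | h <;> simp [max_def] <;> omega

-- A's nested fold, rewritten with max instead of the if-update
lemma pv_A_maxfold (a1 a2 : List String) (h1 : ¬ a1 = []) (h2 : ¬ a2 = []) :
    mxdiflg a1 a2 =
      a1.foldl (fun dif w1 =>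
        a2.foldl (fun d w2 => max d |PySem.Str.len w1 - PySem.Str.len w2|) dif) 0 := by
  unfold mxdiflg
  rw [if_neg (by simp [h1, h2])]
  congr 1
  funext dif w1
  congr 1
  funext d w2
  exact pv_if_max d _

-- ===== VERDICT (by name: the statement is the Claim_ definition above) =====
theorem mxdiflg_spec : Claim_equal_mxdiflg := by
  intro a1 a2 _
  unfold Spec_mxdiflg
  by_cases h1 : a1 = []
  · simp [mxdiflg, mxdiflg_alt, h1]
  by_cases h2 : a2 = []
  · simp [mxdiflg, mxdiflg_alt, h2]
  -- extract the four extremes on the B side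
  set L : String → Int := PySem.Str.len with hL
  have hl1 : a1.map L ≠ [] := by simpa using h1
  have hl2 : a2.map L ≠ [] := by simpa using h2
  obtain ⟨M1, hM1⟩ : ∃ m, PySem.List.max? (a1.map L) (fun x => x) = some m := by
    cases hc : PySem.List.max? (a1.map L) (fun x => x) with
    | none => exact absurd ((PySem.List.max?_eq_none_iff _ _).mp hc) hl1
    | some m => exact ⟨m, rfl⟩
  obtain ⟨M2, hM2⟩ : ∃ m, PySem.List.max? (a2.map L) (fun x => x) = some m := by
    cases hc : PySem.List.max? (a2.map L) (fun x => x) with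
    | none => exact absurd ((PySem.List.max?_eq_none_iff _ _).mp hc) hl2
    | some m => exact ⟨m, rfl⟩
  obtain ⟨m1, hm1⟩ : ∃ m, PySem.List.min? (a1.map L) (fun x => x) = some m := by
    cases hc : PySem.List.min? (a1.map L) (fun x => x) with
    | none => exact absurd ((PySem.List.min?_eq_none_iff _ _).mp hc) hl1
    | some m => exact ⟨m, rfl⟩
  obtain ⟨m2, hm2⟩ : ∃ m, PySem.List.min? (a2.map L) (fun x => x) = some m := by
    cases hc : PySem.List.min? (a2.map L) (fun x => x) with
    | none => exact absurd ((PySem.List.min?_eq_none_iff _ _).mp hc) hl2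
    | some m => exact ⟨m, rfl⟩
  have hB : mxdiflg_alt a1 a2 = max (M1 - m2) (M2 - m1) := by
    unfold mxdiflg_alt
    rw [if_neg (by simp [h1, h2])]
    simp [← hL, hM1, hM2, hm1, hm2]
  -- membership / order facts about the extremes
  obtain ⟨w1M, hw1M, hw1Mv⟩ := List.mem_map.mp (PySem.List.max?_mem hM1)
  obtain ⟨w2M, hw2M, hw2Mv⟩ := List.mem_map.mp (PySem.List.max?_mem hM2)
  obtain ⟨w1m, hw1m, hw1mv⟩ := List.mem_map.mp (PySem.List.min?_mem hm1)
  obtain ⟨w2m, hw2m, hw2mv⟩ := List.mem_map.mp (PySem.List.min?_mem hm2)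
  have hub1 : ∀ w ∈ a1, L w ≤ M1 := fun w hw =>
    PySem.List.max?_isMax hM1 (L w) (List.mem_map.mpr ⟨w, hw, rfl⟩)
  have hub2 : ∀ w ∈ a2, L w ≤ M2 := fun w hw =>
    PySem.List.max?_isMax hM2 (L w) (List.mem_map.mpr ⟨w, hw, rfl⟩)
  have hlb1 : ∀ w ∈ a1, m1 ≤ L w := fun w hw =>
    PySem.List.min?_isMin hm1 (L w) (List.mem_map.mpr ⟨w, hw, rfl⟩)
  have hlb2 : ∀ w ∈ a2, m2 ≤ L w := fun w hw =>
    PySem.List.min?_isMin hm2 (L w) (List.mem_map.mpr ⟨w, hw, rfl⟩)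
  -- facts about A's fold
  rw [pv_A_maxfold a1 a2 h1 h2, hB]
  set inner : String → Int → Int :=
    fun w1 d => a2.foldl (fun d w2 => max d |L w1 - L w2|) d with hinner
  have hinner_le : ∀ (d : Int) (w1 : String), d ≤ inner w1 d := fun d w1 =>
    pv_infl_le _ (fun d w2 => le_max_left _ _) a2 d
  set R : Int := a1.foldl (fun dif w1 => inner w1 dif) 0 with hR
  have hbound : ∀ w1 ∈ a1, ∀ w2 ∈ a2, |L w1 - L w2| ≤ R := by
    intro w1 hw1 w2 hw2
    refine pv_infl_mem _ (fun d w => hinner_le d w) (|L w1 - L w2|) w1 ?_ a1 0 hw1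
    intro d
    exact pv_infl_mem (fun d w => max d |L w1 - L w|) (fun d w => le_max_left _ _)
      (|L w1 - L w2|) w2 (fun d => le_max_right _ _) a2 d hw2
  have hatt : R = 0 ∨ ∃ w1 ∈ a1, ∃ w2 ∈ a2, R = |L w1 - L w2| := by
    refine pv_infl_att _ (fun r w1 => ∃ w2 ∈ a2, r = |L w1 - L w2|) ?_ a1 0
    intro d w1
    rcases pv_infl_att (fun d w2 => max d |L w1 - L w2|)
        (fun r w2 => r = |L w1 - L w2|)
        (fun d w2 => by rcases max_choice d |L w1 - L w2| with h | h <;> [exact Or.inl h; exact Or.inr h])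
        a2 d with h | ⟨w2, hw2, hp⟩
    · exact Or.inl h
    · exact Or.inr ⟨w2, hw2, hp⟩
  -- antisymmetry
  have hge : max (M1 - m2) (M2 - m1) ≤ R := by
    have hA : |M1 - m2| ≤ R := by
      have := hbound w1M hw1M w2m hw2m
      rwa [hw1Mv, hw2mv] at this
    have hBb : |M2 - m1| ≤ R := by
      have := hbound w1m hw1m w2M hw2M
      rw [hw1mv, hw2Mv] at this
      rwa [abs_sub_comm] at this
    refine max_le (le_trans (le_abs_self _) hA) (le_trans (le_abs_self _) hBb)
  have hle : R ≤ max (M1 - m2) (M2 - m1) := by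
    rcases hatt with h0 | ⟨w1, hw1, w2, hw2, hval⟩
    · have h1' : m1 ≤ M1 := hw1Mv ▸ hlb1 w1M hw1M
      have h2' : m2 ≤ M2 := hw2Mv ▸ hlb2 w2M hw2M
      rw [h0]
      rcases max_cases (M1 - m2) (M2 - m1) with ⟨he, hc⟩ | ⟨he, hc⟩ <;> omega
    · have ha1 : L w1 - L w2 ≤ M1 - m2 := by
        have := hub1 w1 hw1; have := hlb2 w2 hw2; omega
      have ha2 : L w2 - L w1 ≤ M2 - m1 := by
        have := hub2 w2 hw2; have := hlb1 w1 hw1; omega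
      rw [hval]
      rcases abs_cases (L w1 - L w2) with ⟨he, _⟩ | ⟨he, _⟩
      · rw [he]; exact le_trans ha1 (le_max_left _ _)
      · rw [he]; exact le_trans (by omega : -(L w1 - L w2) ≤ M2 - m1) (le_max_right _ _)
  omega
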